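-- pv_equiv track=rewrite | github.com/yunting14/DSA | RecursionExercises.py | count8
-- ===== SOURCE A (Python) =====
-- def count8(number):
--     if number == 0:
--         return 0
--
--     num_string = str(number)
--     count=0
--
--     if len(num_string) == 1:
--         if num_string[-1] == "8":
--             count = 1
--         else:
--             count = 0
--
--     if len(num_string) > 1:
--         if num_string[-1] == "8" and num_string[-2] == "8":
--             count = 2
--         elif num_string[-1] == "8":
--             count = 1
--
--     next = number // 10
--     return count + count8(next)
-- ===== SOURCE B (Python) =====
-- def count8(number):
--     total = 0
--     n = number
--     while n > 0:
--         d = n % 10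
--         n //= 10
--         if d == 8:
--             total += 2 if n % 10 == 8 else 1
--     return total
-- ===== Notes on version B (the rewrite author's own statement) =====
-- stated objective: simpler
-- what changed: Replaced the string-converting recursion (str(number) rebuilt at every level, last/second-to-last character compared to '8') by a plain iterative digit loop with an accumulator that uses only modulo and floor-division arithmetic.
-- outside the precondition, e.g. on count8(-1): A raises RecursionError, B returns 0
import Mathlib
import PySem

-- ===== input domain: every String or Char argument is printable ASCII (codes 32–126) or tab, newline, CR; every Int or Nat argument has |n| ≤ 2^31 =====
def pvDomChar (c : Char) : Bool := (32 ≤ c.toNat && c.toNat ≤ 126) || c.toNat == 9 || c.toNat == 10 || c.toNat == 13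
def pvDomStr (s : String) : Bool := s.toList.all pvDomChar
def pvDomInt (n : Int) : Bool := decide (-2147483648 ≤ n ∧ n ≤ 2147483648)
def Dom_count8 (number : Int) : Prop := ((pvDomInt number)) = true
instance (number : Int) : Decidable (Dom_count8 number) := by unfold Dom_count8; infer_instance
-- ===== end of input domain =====

-- B replaces A's string-converting recursion by an iterative digit loop using only modulo and floor-division arithmetic (objective: simpler).

-- ===== PORT A =====
def count8 (number : Int) : Int :=
  if _h0 : number = 0 then 0
  else if _hneg : number < 0 then 0
    -- totalization guard only: Python's recursion never terminates on negative input
    -- (floor division by ten never reaches zero), raising RecursionError; outside Pre_count8.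
  else
    let numString := PySem.Int.toStr number
    let count : Int := 0
    let count : Int :=
      if PySem.Str.len numString = 1 then
        (if PySem.Str.pyGet? numString (-1) = some '8' then 1 else 0)
      else count
    let count : Int :=
      if 1 < PySem.Str.len numString then
        (if PySem.Str.pyGet? numString (-1) = some '8' ∧ PySem.Str.pyGet? numString (-2) = some '8' then 2
         else if PySem.Str.pyGet? numString (-1) = some '8' then 1
         else count)
      else count
    count + count8 (PySem.Int.floordiv number 10)
termination_by number.toNat
decreasing_by
  rw [PySem.Int.floordiv_eq_ediv_of_pos (by omega)]
  omega

-- ===== PORT B =====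
def count8AltGo (n total : Int) : Int :=
  if _h : 0 < n then
    let d := PySem.Int.mod n 10
    let n' := PySem.Int.floordiv n 10
    let total : Int :=
      if d = 8 then total + (if PySem.Int.mod n' 10 = 8 then 2 else 1) else total
    count8AltGo n' total
  else total
termination_by n.toNat
decreasing_by
  rw [PySem.Int.floordiv_eq_ediv_of_pos (by omega)]
  omega

def count8_alt (number : Int) : Int := count8AltGo number 0

-- ===== PRECONDITION & SPEC =====
-- Pre_ excludes negative inputs, on which the Python A never returns: floor-dividing a negative
-- number by ten never reaches zero, so the recursion raises RecursionError (B returns 0 there).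
def Pre_count8 (number : Int) : Prop := 0 ≤ number
instance (number : Int) : Decidable (Pre_count8 number) := by unfold Pre_count8; infer_instance
def pvWitness_count8 : Int := 888

def Spec_count8 (number : Int) (out : Int) : Prop := out = count8_alt number
instance (number : Int) (out : Int) : Decidable (Spec_count8 number out) := by unfold Spec_count8; infer_instance

-- ===== CLAIM (what is proved, stated in full; the proofs are below) =====
def Claim_equal_count8 : Prop := ∀ (number : Int), Dom_count8 number → Pre_count8 number → Spec_count8 number (count8 number)
-- ===== LEMMAS AND PROOFS =====

-- the digit string of a nonnegative number, most significant digit first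
def rep (n : Nat) : List Char :=
  if n < 10 then [Nat.digitChar n]
  else rep (n / 10) ++ [Nat.digitChar (n % 10)]
termination_by n
decreasing_by omega

lemma rep_ne_nil (n : Nat) : rep n ≠ [] := by
  unfold rep; split <;> simp

lemma rep_length_eq_one_iff (n : Nat) : (rep n).length = 1 ↔ n < 10 := by
  unfold rep; split
  · simpa
  · rename_i h
    have := rep_ne_nil (n / 10)
    simp only [List.length_append, List.length_cons, List.length_nil]
    constructor
    · intro hlen
      have : (rep (n / 10)).length = 0 := by omega
      simp [List.length_eq_zero_iff] at this
      exact absurd this (rep_ne_nil _)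
    · intro; omega

lemma toDigitsCore_eq_rep : ∀ (f n : Nat), ∀ ds : List Char, n < 10 ^ f →
    Nat.toDigitsCore 10 (f + 1) n ds = rep n ++ ds := by
  intro f
  induction f with
  | zero =>
    intro n ds h
    have hn : n = 0 := by omega
    subst hn
    simp [Nat.toDigitsCore, rep]
  | succ g ih =>
    intro n ds h
    rw [Nat.toDigitsCore]
    by_cases h10 : n / 10 = 0
    · have hlt : n < 10 := by omega
      simp [h10, rep, hlt, Nat.mod_eq_of_lt hlt]
    · have hge : ¬ n < 10 := by omega
      simp only [h10, if_false]
      rw [ih (n / 10) _ (by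
        have : 10 ^ (g + 1) = 10 ^ g * 10 := by ring
        omega)]
      conv_rhs => rw [rep]
      simp [hge]

lemma toChars_eq_rep (n : Int) (h : 0 < n) : PySem.Int.toChars n = rep n.toNat := by
  have hneg : ¬ n < 0 := by omega
  rw [PySem.Int.toChars, if_neg hneg, Nat.toDigits]
  rw [toDigitsCore_eq_rep n.toNat n.toNat [] (Nat.lt_pow_self (by norm_num))]
  simp

lemma digitChar_eq_eight_iff (r : Nat) (h : r < 10) : Nat.digitChar r = '8' ↔ r = 8 := by
  interval_cases r <;> decide

lemma pyGet?_snoc_neg_one {α : Type} (xs : List α) (x : α) :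
    PySem.List.pyGet? (xs ++ [x]) (-1) = some x := by
  have hlen : (xs ++ [x]).length = xs.length + 1 := by simp
  unfold PySem.List.pyGet? PySem.List.pyIdx?
  rw [hlen, if_neg (by norm_num), if_pos (by omega)]
  simp only [Option.bind]
  norm_num

lemma pyGet?_snoc2_neg_two {α : Type} (xs : List α) (a b : α) :
    PySem.List.pyGet? (xs ++ [a, b]) (-2) = some a := by
  have hlen : (xs ++ [a, b]).length = xs.length + 2 := by simp
  unfold PySem.List.pyGet? PySem.List.pyIdx?
  rw [hlen, if_neg (by norm_num), if_pos (by omega)]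
  simp only [Option.bind]
  norm_num
  have hidx : xs.length + 2 - Int.toNat 2 = xs.length := by rw [show (Int.toNat 2) = 2 from rfl]; omega
  simp only [hidx]
  rw [List.getElem_append_right (by omega)]
  simp

lemma rep_last (n : Nat) : ∃ ys, rep n = ys ++ [Nat.digitChar (n % 10)] := by
  unfold rep; split
  · rename_i h
    exact ⟨[], by simp [Nat.mod_eq_of_lt h]⟩
  · exact ⟨rep (n / 10), rfl⟩

lemma pyGet?_rep_neg_one (n : Nat) :
    PySem.List.pyGet? (rep n) (-1) = some (Nat.digitChar (n % 10)) := by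
  obtain ⟨ys, hy⟩ := rep_last n
  rw [hy, pyGet?_snoc_neg_one]

lemma pyGet?_rep_neg_two (n : Nat) (h : ¬ n < 10) :
    PySem.List.pyGet? (rep n) (-2) = some (Nat.digitChar (n / 10 % 10)) := by
  rw [rep]
  simp only [h, if_false]
  obtain ⟨ys, hy⟩ := rep_last (n / 10)
  rw [hy, List.append_assoc]
  exact pyGet?_snoc2_neg_two ys _ _

-- one unfolding of port A on a positive input, expressed arithmetically
lemma count8_pos_eq (m : Nat) (h : 0 < m) :
    count8 (m : Int) =
      (if m % 10 = 8 then (if m / 10 % 10 = 8 then (2 : Int) else 1) else 0) + count8 ((m / 10 : Nat) : Int) := by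
  rw [count8]
  have h0 : ¬ ((m : Int) = 0) := by omega
  have hneg : ¬ ((m : Int) < 0) := by omega
  simp only [h0, hneg, dite_false]
  have hchars : (PySem.Int.toStr (m : Int)).toList = rep m := by
    rw [PySem.Int.toList_toStr, toChars_eq_rep _ (by omega)]
    simp
  have hlen : PySem.Str.len (PySem.Int.toStr (m : Int)) = ((rep m).length : Int) := by
    simp [PySem.Str.len, hchars]
  have hget1 : PySem.Str.pyGet? (PySem.Int.toStr (m : Int)) (-1) = some (Nat.digitChar (m % 10)) := by
    simp [PySem.Str.pyGet?, PySem.Chars.pyGet?, hchars, pyGet?_rep_neg_one]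
  have hfd : PySem.Int.floordiv (m : Int) 10 = ((m / 10 : Nat) : Int) := by
    exact_mod_cast PySem.Int.floordiv_natCast m 10
  rw [hlen, hget1, hfd]
  have hlast : (Nat.digitChar (m % 10) = '8') ↔ m % 10 = 8 :=
    digitChar_eq_eight_iff (m % 10) (by omega)
  by_cases h10 : m < 10
  · have hl1 : ((rep m).length : Int) = 1 := by
      exact_mod_cast (rep_length_eq_one_iff m).mpr h10
    simp only [hl1]
    norm_num
    have hd : m / 10 = 0 := by omega
    simp only [hlast, hd]
    split_ifs <;> simp_all
  · have hl1 : ((rep m).length : Int) ≠ 1 := by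
      intro hc
      exact h10 ((rep_length_eq_one_iff m).mp (by exact_mod_cast hc))
    have hlgt : 1 < ((rep m).length : Int) := by
      have := List.length_pos_iff.mpr (rep_ne_nil m)
      omega
    have hget2 : PySem.Str.pyGet? (PySem.Int.toStr (m : Int)) (-2) = some (Nat.digitChar (m / 10 % 10)) := by
      simp [PySem.Str.pyGet?, PySem.Chars.pyGet?, hchars, pyGet?_rep_neg_two m h10]
    rw [hget2]
    have hsec : (Nat.digitChar (m / 10 % 10) = '8') ↔ m / 10 % 10 = 8 :=
      digitChar_eq_eight_iff (m / 10 % 10) (by omega)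
    simp only [hl1, hlgt, if_true, if_false, Option.some.injEq, hlast, hsec]
    split_ifs <;> simp_all

lemma count8AltGo_eq (m : Nat) : ∀ t : Int, count8AltGo (m : Int) t = t + count8 (m : Int) := by
  induction m using Nat.strong_induction_on with
  | _ m ih =>
    intro t
    by_cases h : 0 < m
    · rw [count8AltGo]
      have hpos : (0 : Int) < (m : Int) := by omega
      simp only [hpos, dif_pos]
      have hmod : PySem.Int.mod (m : Int) 10 = ((m % 10 : Nat) : Int) := by
        exact_mod_cast PySem.Int.mod_natCast m 10
      have hfd : PySem.Int.floordiv (m : Int) 10 = ((m / 10 : Nat) : Int) := by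
        exact_mod_cast PySem.Int.floordiv_natCast m 10
      have hmod2 : PySem.Int.mod ((m / 10 : Nat) : Int) 10 = ((m / 10 % 10 : Nat) : Int) := by
        exact_mod_cast PySem.Int.mod_natCast (m / 10) 10
      rw [hmod, hfd, hmod2, ih (m / 10) (by omega), count8_pos_eq m h]
      have e1 : (((m % 10 : Nat) : Int) = 8) ↔ m % 10 = 8 := by omega
      have e2 : (((m / 10 % 10 : Nat) : Int) = 8) ↔ m / 10 % 10 = 8 := by omega
      simp only [e1, e2]
      split_ifs <;> ring
    · have hm : m = 0 := by omega
      subst hm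
      rw [count8AltGo, count8]
      norm_num

-- ===== VERDICT (by name: the statement is the Claim_ definition above) =====
theorem count8_spec : Claim_equal_count8 := by
  intro number _hD hP
  unfold Spec_count8 count8_alt
  have h : ((number.toNat : Nat) : Int) = number := by
    unfold Pre_count8 at hP; omega
  rw [← h, count8AltGo_eq number.toNat 0, zero_add]
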